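-- pv_equiv track=rewrite | github.com/IPGP/geodezyx | geodezyx/legacy_source/lib/discontinued_bc_transfered/cgkitmod/bvhimport.py | rotationOrder
-- ===== SOURCE A (Python) =====
-- def rotationOrder(channels):
--     """Determine rotation order string from the channel names.
--     """
--     res = ""
--     for c in channels:
--         if c[-8:]=="rotation":
--             res += c[0]
--
--     # Complete the order string if it doesn't already contain
--     # all three axes
--     m = { "":"XYZ",
--           "X":"XYZ", "Y":"YXZ", "Z":"ZXY",
--           "XY":"XYZ", "XZ":"XZY",
--           "YX":"YXZ", "YZ":"YZX",
--           "ZX":"ZXY", "ZY":"ZYX" }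
--     if res in m:
--         res = m[res]
--     return res
-- ===== SOURCE B (Python) =====
-- def rotationOrder(channels):
--     res = "".join(c[0] for c in channels if c[-8:] == "rotation")
--     seen = set(res)
--     if len(seen) == len(res) and seen <= set("XYZ"):
--         res += "".join(a for a in "XYZ" if a not in seen)
--     return res
-- ===== Notes on version B (the rewrite author's own statement) =====
-- stated objective: simpler
-- what changed: The 10-entry completion lookup table is replaced by a computed closed form: if the collected axis letters are distinct and all in {X,Y,Z}, append the missing axes in fixed X,Y,Z order, otherwise return the string unchanged; the channel scan becomes a join over a generator.
import Mathlib
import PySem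

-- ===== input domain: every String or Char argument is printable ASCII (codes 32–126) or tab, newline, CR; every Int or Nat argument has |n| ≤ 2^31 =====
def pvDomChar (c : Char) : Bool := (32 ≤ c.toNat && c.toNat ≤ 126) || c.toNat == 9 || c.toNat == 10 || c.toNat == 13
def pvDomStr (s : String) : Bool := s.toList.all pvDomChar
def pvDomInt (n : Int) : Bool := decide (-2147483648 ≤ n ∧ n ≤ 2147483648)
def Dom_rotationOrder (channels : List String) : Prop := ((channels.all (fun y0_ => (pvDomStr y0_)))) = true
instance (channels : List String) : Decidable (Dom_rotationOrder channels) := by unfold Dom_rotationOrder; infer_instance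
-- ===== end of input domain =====

-- B replaces A's 10-entry completion lookup table by a computed completion (append the
-- missing axes in X,Y,Z order when the collected axes are distinct and valid) — objective: simpler.


-- ===== PORT A =====
-- the literal completion table m of A
def rotationOrderTable : PySem.Dict String String :=
  PySem.Dict.ofList [("", "XYZ"),
    ("X", "XYZ"), ("Y", "YXZ"), ("Z", "ZXY"),
    ("XY", "XYZ"), ("XZ", "XZY"),
    ("YX", "YXZ"), ("YZ", "YZX"),
    ("ZX", "ZXY"), ("ZY", "ZYX")]

def rotationOrder (channels : List String) : String :=
  -- res = ""; for c in channels: if c[-8:]=="rotation": res += c[0]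
  let res : List Char := channels.foldl (fun res c =>
    if PySem.Str.slice c (some (-8)) none = "rotation" then
      match PySem.Str.pyGet? c 0 with
      | some ch => res ++ [ch]
      | none => res   -- unreachable: the slice equals "rotation", so c has length ≥ 8
    else res) []
  -- if res in m: res = m[res]
  match rotationOrderTable.get? (String.ofList res) with
  | some v => v
  | none => String.ofList res

-- ===== PORT B =====
def rotationOrder_alt (channels : List String) : String :=
  -- res = "".join(c[0] for c in channels if c[-8:] == "rotation")
  let res : List Char := channels.filterMap (fun c =>
    if PySem.Str.slice c (some (-8)) none = "rotation" then PySem.Str.pyGet? c 0 else none)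
  -- seen = set(res)
  let seen : PySem.Set Char := PySem.Set.ofList res
  -- if len(seen) == len(res) and seen <= set("XYZ"): res += missing axes in X,Y,Z order
  if PySem.Set.len seen = res.length ∧ PySem.Set.issubset seen (PySem.Set.ofList "XYZ".toList) = true then
    String.ofList (res ++ "XYZ".toList.filter (fun a => !(PySem.Set.contains seen a)))
  else
    String.ofList res

-- ===== PRECONDITION & SPEC =====
def Spec_rotationOrder (channels : List String) (out : String) : Prop := out = rotationOrder_alt channels
instance (channels : List String) (out : String) : Decidable (Spec_rotationOrder channels out) := by unfold Spec_rotationOrder; infer_instance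

-- ===== CLAIM (what is proved, stated in full; the proofs are below) =====
def Claim_equal_rotationOrder : Prop := ∀ (channels : List String), Dom_rotationOrder channels → Spec_rotationOrder channels (rotationOrder channels)

-- ===== LEMMAS AND PROOFS =====

-- the per-channel contribution both ports compute
def pvPick (c : String) : Option Char :=
  if PySem.Str.slice c (some (-8)) none = "rotation" then PySem.Str.pyGet? c 0 else none

-- A's accumulating loop is B's filterMap
theorem loopA_eq_filterMap (l : List String) (acc : List Char) :
    l.foldl (fun res c =>
      if PySem.Str.slice c (some (-8)) none = "rotation" then
        match PySem.Str.pyGet? c 0 with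
        | some ch => res ++ [ch]
        | none => res
      else res) acc = acc ++ l.filterMap pvPick := by
  induction l generalizing acc with
  | nil => simp
  | cons c t ih =>
    rw [List.foldl_cons, ih, List.filterMap_cons]
    by_cases hc : PySem.Str.slice c (some (-8)) none = "rotation"
    · simp only [pvPick, if_pos hc]
      cases PySem.Str.pyGet? c 0 <;> simp
    · simp only [pvPick, if_neg hc]

-- all lists of distinct axis letters
def pvAxisLists : List (List Char) :=
  [[], ['X'], ['Y'], ['Z'],
   ['X','Y'], ['X','Z'], ['Y','X'], ['Y','Z'], ['Z','X'], ['Z','Y'],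
   ['X','Y','Z'], ['X','Z','Y'], ['Y','X','Z'], ['Y','Z','X'], ['Z','X','Y'], ['Z','Y','X']]

theorem mem_pvAxisLists (res : List Char) (hnd : res.Nodup)
    (hsub : res ⊆ ['X','Y','Z']) : res ∈ pvAxisLists := by
  have hlen : res.length ≤ 3 := (List.subperm_of_subset hnd hsub).length_le
  match res with
  | [] => decide
  | [a] =>
    have ha := hsub (List.mem_singleton_self a)
    simp only [List.mem_cons, List.not_mem_nil, or_false] at ha
    rcases ha with rfl | rfl | rfl <;> decide
  | [a, b] =>
    have ha := hsub (by simp : a ∈ [a, b])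
    have hb := hsub (by simp : b ∈ [a, b])
    simp only [List.mem_cons, List.not_mem_nil, or_false] at ha hb
    simp only [List.nodup_cons, List.mem_cons] at hnd
    rcases ha with rfl | rfl | rfl <;> rcases hb with rfl | rfl | rfl <;> simp_all <;> decide
  | [a, b, c] =>
    have ha := hsub (by simp : a ∈ [a, b, c])
    have hb := hsub (by simp : b ∈ [a, b, c])
    have hc := hsub (by simp : c ∈ [a, b, c])
    simp only [List.mem_cons, List.not_mem_nil, or_false] at ha hb hc
    simp only [List.nodup_cons, List.mem_cons, List.nodup_nil] at hnd
    rcases ha with rfl | rfl | rfl <;> rcases hb with rfl | rfl | rfl <;>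
      rcases hc with rfl | rfl | rfl <;> simp_all <;> decide
  | a :: b :: c :: d :: t => simp at hlen; omega

-- B's guard forces the collected letters to be distinct
theorem nodup_of_len_ofList_eq (res : List Char)
    (h : PySem.Set.len (PySem.Set.ofList res) = res.length) : res.Nodup := by
  have hsub : PySem.Set.ofList res ⊆ res := fun x hx => (PySem.Set.mem_ofList _ _).1 hx
  have hsp : List.Subperm (PySem.Set.ofList res) res :=
    List.subperm_of_subset (PySem.Set.nodup_ofList res) hsub
  have hlen : res.length ≤ (PySem.Set.ofList res).length := by
    simp only [PySem.Set.len] at h; omega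
  have hperm := hsp.perm_of_length_le hlen
  exact hperm.nodup (PySem.Set.nodup_ofList res)

-- the table lookup agrees with the computed completion, for EVERY collected string
theorem phase2_eq (res : List Char) :
    (match rotationOrderTable.get? (String.ofList res) with
     | some v => v
     | none => String.ofList res)
    = (if PySem.Set.len (PySem.Set.ofList res) = res.length ∧
          PySem.Set.issubset (PySem.Set.ofList res) (PySem.Set.ofList "XYZ".toList) = true then
         String.ofList (res ++ "XYZ".toList.filter (fun a => !(PySem.Set.contains (PySem.Set.ofList res) a)))
       else String.ofList res) := by
  by_cases hmem : res ∈ pvAxisLists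
  · fin_cases hmem <;> decide
  · -- res is not a distinct-axis string: A's lookup misses and B's guard is false
    have hguard : ¬ (PySem.Set.len (PySem.Set.ofList res) = res.length ∧
        PySem.Set.issubset (PySem.Set.ofList res) (PySem.Set.ofList "XYZ".toList) = true) := by
      rintro ⟨h1, h2⟩
      have hnd := nodup_of_len_ofList_eq res h1
      have hsub : res ⊆ ['X','Y','Z'] := by
        intro x hx
        have := (PySem.Set.issubset_iff _ _).1 h2 x ((PySem.Set.mem_ofList _ _).2 hx)
        simpa using (PySem.Set.mem_ofList _ _).1 this
      exact hmem (mem_pvAxisLists res hnd hsub)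
    have hget : rotationOrderTable.get? (String.ofList res) = none := by
      have hne : ∀ l ∈ pvAxisLists, res ≠ l := fun l hl h => hmem (h ▸ hl)
      have htab : rotationOrderTable = PySem.Dict.mk [("", "XYZ"),
          ("X", "XYZ"), ("Y", "YXZ"), ("Z", "ZXY"),
          ("XY", "XYZ"), ("XZ", "XZY"),
          ("YX", "YXZ"), ("YZ", "YZX"),
          ("ZX", "ZXY"), ("ZY", "ZYX")] := by decide
      rw [htab]
      simp only [PySem.Dict.get?_mk_cons, beq_iff_eq]
      split_ifs with h1 h2 h3 h4 h5 h6 h7 h8 h9 h10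
      · exact absurd (String.ofList_inj.mp (show String.ofList [] = String.ofList res from h1)).symm
          (hne [] (by decide))
      · exact absurd (String.ofList_inj.mp (show String.ofList ['X'] = String.ofList res from h2)).symm
          (hne ['X'] (by decide))
      · exact absurd (String.ofList_inj.mp (show String.ofList ['Y'] = String.ofList res from h3)).symm
          (hne ['Y'] (by decide))
      · exact absurd (String.ofList_inj.mp (show String.ofList ['Z'] = String.ofList res from h4)).symm
          (hne ['Z'] (by decide))
      · exact absurd (String.ofList_inj.mp (show String.ofList ['X','Y'] = String.ofList res from h5)).symm
          (hne ['X','Y'] (by decide))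
      · exact absurd (String.ofList_inj.mp (show String.ofList ['X','Z'] = String.ofList res from h6)).symm
          (hne ['X','Z'] (by decide))
      · exact absurd (String.ofList_inj.mp (show String.ofList ['Y','X'] = String.ofList res from h7)).symm
          (hne ['Y','X'] (by decide))
      · exact absurd (String.ofList_inj.mp (show String.ofList ['Y','Z'] = String.ofList res from h8)).symm
          (hne ['Y','Z'] (by decide))
      · exact absurd (String.ofList_inj.mp (show String.ofList ['Z','X'] = String.ofList res from h9)).symm
          (hne ['Z','X'] (by decide))
      · exact absurd (String.ofList_inj.mp (show String.ofList ['Z','Y'] = String.ofList res from h10)).symm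
          (hne ['Z','Y'] (by decide))
      · rfl
    rw [hget, if_neg hguard]

-- ===== VERDICT (by name: the statement is the Claim_ definition above) =====
theorem rotationOrder_spec : Claim_equal_rotationOrder := by
  intro channels _
  unfold Spec_rotationOrder rotationOrder rotationOrder_alt
  rw [loopA_eq_filterMap]
  simpa [pvPick] using phase2_eq (channels.filterMap pvPick)
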